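-- pv_equiv track=rewrite | github.com/aditya-reserach/Hacker-Rank-Python | 39.Time Delta.py | to_seconds
-- ===== SOURCE A (Python) =====
-- def is_leap_year(year):
--     # Leap year check rule
--     return (year % 400 == 0) or (year % 4 == 0 and year % 100 != 0)
--
-- def days_in_month(year, month):
--     # Number of days in each month
--     if month == 2:
--         return 29 if is_leap_year(year) else 28
--     elif month in [1, 3, 5, 7, 8, 10, 12]:
--         return 31
--     else:
--         return 30
--
-- def to_seconds(year, month, day, hour, minute, second, tz_offset):
--     # Convert full timestamp into total seconds from year 0
--     days = 0
--     for y in range(0, year):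
--         days += 366 if is_leap_year(y) else 365
--     for m in range(1, month):
--         days += days_in_month(year, m)
--     days += (day - 1)
--     total_seconds = days * 86400 + hour * 3600 + minute * 60 + second
--     # Adjust for timezone offset
--     return total_seconds - tz_offset
-- ===== SOURCE B (Python) =====
-- def to_seconds(year, month, day, hour, minute, second, tz_offset):
--     # Day count in closed form: floor-division leap arithmetic and a cumulative
--     # month-length table replace the per-year and per-month loops.
--     _CUM = (0, 0, 31, 59, 90, 120, 151, 181, 212, 243, 273, 304, 334, 365)
--     days = 0
--     if year > 0:
--         days = 365 * year + (year + 3) // 4 - (year + 99) // 100 + (year + 399) // 400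
--     if month >= 2:
--         days += _CUM[month]
--         if month > 2 and year % 4 == 0 and (year % 100 != 0 or year % 400 == 0):
--             days += 1
--     days += day - 1
--     return days * 86400 + hour * 3600 + minute * 60 + second - tz_offset
-- ===== Notes on version B (the rewrite author's own statement) =====
-- stated objective: alternative
-- what changed: Replaces the O(year) per-year loop and the per-month loop with a closed-form leap-year count via floor division plus a cumulative month-days table; Pre_ excludes month >= 14, where A's loop accidentally treats the extra months as 30-day months while B's table lookup raises IndexError, so a timing run's large inputs fall outside the claim and no speed is claimed.
-- outside the precondition, e.g. on to_seconds(2000, 14, 1, 0, 0, 0, 0): A returns 63148118400, B raises IndexError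
import Mathlib
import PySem

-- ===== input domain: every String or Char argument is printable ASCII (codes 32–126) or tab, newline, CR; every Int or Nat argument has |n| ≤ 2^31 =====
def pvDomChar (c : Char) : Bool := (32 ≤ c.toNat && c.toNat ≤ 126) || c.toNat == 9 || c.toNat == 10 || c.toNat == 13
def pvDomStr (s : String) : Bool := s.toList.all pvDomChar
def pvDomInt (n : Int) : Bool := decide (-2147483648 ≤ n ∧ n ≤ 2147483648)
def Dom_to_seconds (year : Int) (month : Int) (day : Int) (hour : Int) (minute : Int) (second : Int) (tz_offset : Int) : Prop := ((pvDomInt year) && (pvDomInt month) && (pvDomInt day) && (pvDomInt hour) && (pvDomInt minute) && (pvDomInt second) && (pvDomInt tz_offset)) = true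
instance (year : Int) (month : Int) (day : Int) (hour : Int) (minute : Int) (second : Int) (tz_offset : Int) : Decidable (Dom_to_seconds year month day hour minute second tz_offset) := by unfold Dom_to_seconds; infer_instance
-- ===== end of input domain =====

-- B computes the day count by closed-form floor-division leap arithmetic and a
-- cumulative month table instead of A's per-year and per-month loops (objective: alternative;
-- a timing run could not credit speed because its large inputs lie outside Pre_).

-- ===== PORT A =====
def is_leap_year (year : Int) : Bool :=
  (PySem.Int.mod year 400 == 0) || (PySem.Int.mod year 4 == 0 && PySem.Int.mod year 100 != 0)

def days_in_month (year : Int) (month : Int) : Int :=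
  if month = 2 then (if is_leap_year year then 29 else 28)
  else if month ∈ ([1, 3, 5, 7, 8, 10, 12] : List Int) then 31
  else 30

def to_seconds (year : Int) (month : Int) (day : Int) (hour : Int) (minute : Int) (second : Int) (tz_offset : Int) : Int :=
  let days : Int := (PySem.List.pyRange 0 year 1).foldl
    (fun d y => d + (if is_leap_year y then 366 else 365)) 0
  let days := (PySem.List.pyRange 1 month 1).foldl
    (fun d m => d + days_in_month year m) days
  let days := days + (day - 1)
  let total_seconds := days * 86400 + hour * 3600 + minute * 60 + second
  total_seconds - tz_offset

-- ===== PORT B =====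
def is_leap_alt (year : Int) : Bool :=
  PySem.Int.mod year 4 == 0 && (PySem.Int.mod year 100 != 0 || PySem.Int.mod year 400 == 0)

def cumDays : List Int := [0, 0, 31, 59, 90, 120, 151, 181, 212, 243, 273, 304, 334, 365]

-- _CUM[month] raises IndexError in Python for month ≥ 14; Pre_to_seconds excludes those,
-- so the pyGetD default 0 is never reached on admitted inputs.
def to_seconds_alt (year : Int) (month : Int) (day : Int) (hour : Int) (minute : Int) (second : Int) (tz_offset : Int) : Int :=
  let days : Int :=
    if year > 0 then
      365 * year + PySem.Int.floordiv (year + 3) 4 - PySem.Int.floordiv (year + 99) 100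
        + PySem.Int.floordiv (year + 399) 400
    else 0
  let days :=
    if month ≥ 2 then
      days + PySem.List.pyGetD cumDays month 0
        + (if 2 < month ∧ is_leap_alt year then 1 else 0)
    else days
  let days := days + (day - 1)
  days * 86400 + hour * 3600 + minute * 60 + second - tz_offset

-- ===== PRECONDITION & SPEC =====
-- Pre_ excludes month ≥ 14, on which A still returns a value (its month loop falls into
-- the 30-day else branch for the out-of-range months) but B's table lookup raises IndexError.
def Pre_to_seconds (year : Int) (month : Int) (day : Int) (hour : Int) (minute : Int) (second : Int) (tz_offset : Int) : Prop :=
  month ≤ 13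
instance (year : Int) (month : Int) (day : Int) (hour : Int) (minute : Int) (second : Int) (tz_offset : Int) : Decidable (Pre_to_seconds year month day hour minute second tz_offset) := by unfold Pre_to_seconds; infer_instance

def pvWitness_to_seconds : Int × Int × Int × Int × Int × Int × Int := (4, 3, 1, 0, 0, 0, 0)

def Spec_to_seconds (year : Int) (month : Int) (day : Int) (hour : Int) (minute : Int) (second : Int) (tz_offset : Int) (out : Int) : Prop := out = to_seconds_alt year month day hour minute second tz_offset
instance (year : Int) (month : Int) (day : Int) (hour : Int) (minute : Int) (second : Int) (tz_offset : Int) (out : Int) : Decidable (Spec_to_seconds year month day hour minute second tz_offset out) := by unfold Spec_to_seconds; infer_instance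

-- ===== CLAIM (what is proved, stated in full; the proofs are below) =====
def Claim_equal_to_seconds : Prop := ∀ (year : Int) (month : Int) (day : Int) (hour : Int) (minute : Int) (second : Int) (tz_offset : Int), Dom_to_seconds year month day hour minute second tz_offset → Pre_to_seconds year month day hour minute second tz_offset → Spec_to_seconds year month day hour minute second tz_offset (to_seconds year month day hour minute second tz_offset)

-- ===== LEMMAS AND PROOFS =====

-- closed forms under loop-free names, used only by the proofs
def yearDays (year : Int) : Int :=
  if year > 0 then
    365 * year + PySem.Int.floordiv (year + 3) 4 - PySem.Int.floordiv (year + 99) 100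
      + PySem.Int.floordiv (year + 399) 400
  else 0

def monthDays (year : Int) (month : Int) : Int :=
  if month ≥ 2 then
    PySem.List.pyGetD cumDays month 0 + (if 2 < month ∧ is_leap_alt year then 1 else 0)
  else 0

lemma is_leap_eq (y : Int) : is_leap_year y = is_leap_alt y := by
  unfold is_leap_year is_leap_alt
  rw [Bool.eq_iff_iff]
  simp only [Bool.or_eq_true, Bool.and_eq_true, beq_iff_eq, bne_iff_ne, ne_eq,
    PySem.Int.mod_eq_zero_iff_dvd]
  omega

lemma is_leap_iff (n : Nat) : is_leap_year (n : Int) = true ↔ ((4 ∣ n ∧ ¬ 100 ∣ n) ∨ 400 ∣ n) := by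
  simp only [is_leap_year, Bool.or_eq_true, Bool.and_eq_true, beq_iff_eq, bne_iff_ne, ne_eq,
    PySem.Int.mod_eq_zero_iff_dvd]
  omega

lemma yearDays_nat (n : Nat) :
    yearDays (n : Int) =
      365 * (n : Int) + ((n + 3) / 4 : Nat) - ((n + 99) / 100 : Nat) + ((n + 399) / 400 : Nat) := by
  rcases Nat.eq_zero_or_pos n with h | h
  · subst h; simp [yearDays]
  · have hpos : (0 : Int) < n := by exact_mod_cast h
    simp only [yearDays, if_pos hpos]
    rw [PySem.Int.floordiv_eq_ediv_of_pos (by norm_num),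
        PySem.Int.floordiv_eq_ediv_of_pos (by norm_num),
        PySem.Int.floordiv_eq_ediv_of_pos (by norm_num)]
    push_cast
    omega

lemma year_loop_eq (n : Nat) :
    (PySem.List.pyRange 0 (n : Int) 1).foldl
      (fun d y => d + (if is_leap_year y then 366 else 365)) 0 = yearDays (n : Int) := by
  induction n with
  | zero => simp [yearDays]
  | succ k ih =>
    rw [show ((k + 1 : Nat) : Int) = (k : Int) + 1 by push_cast; ring,
        PySem.List.pyRange_one_succ_right (Int.natCast_nonneg k),
        List.foldl_append, ih]
    simp only [List.foldl_cons, List.foldl_nil]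
    rw [yearDays_nat, show ((k : Int) + 1) = ((k + 1 : Nat) : Int) by push_cast; ring,
        yearDays_nat]
    by_cases hl : is_leap_year (k : Int) = true
    · rw [if_pos hl]
      rcases (is_leap_iff k).mp hl with ⟨h4, h100⟩ | h400
      · have : ¬ 400 ∣ k := fun hc => h100 (dvd_trans ⟨4, by ring⟩ hc)
        push_cast; omega
      · have h4 : 4 ∣ k := dvd_trans ⟨100, by ring⟩ h400
        have h100 : 100 ∣ k := dvd_trans ⟨4, by ring⟩ h400
        push_cast; omega
    · rw [if_neg hl]
      rw [is_leap_iff] at hl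
      have h4or : ¬ 4 ∣ k ∨ (100 ∣ k ∧ ¬ 400 ∣ k) := by tauto
      rcases h4or with h4 | ⟨h100, h400⟩
      · have h100 : ¬ 100 ∣ k := fun hc => h4 (dvd_trans ⟨25, by ring⟩ hc)
        have h400 : ¬ 400 ∣ k := fun hc => h4 (dvd_trans ⟨100, by ring⟩ hc)
        push_cast; omega
      · have h4 : 4 ∣ k := dvd_trans ⟨25, by ring⟩ h100
        push_cast; omega

lemma year_loop_eq' (year : Int) :
    (PySem.List.pyRange 0 year 1).foldl
      (fun d y => d + (if is_leap_year y then 366 else 365)) 0 = yearDays year := by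
  rcases (by omega : year ≤ 0 ∨ 0 < year) with h | h
  · rw [PySem.List.pyRange_one_eq_nil h]
    simp [yearDays, not_lt.mpr h]
  · obtain ⟨n, rfl⟩ : ∃ n : Nat, year = (n : Int) := ⟨year.toNat, by omega⟩
    exact year_loop_eq n

lemma month_loop_eq (year month : Int) (hm : month ≤ 13) (c : Int) :
    (PySem.List.pyRange 1 month 1).foldl (fun d m => d + days_in_month year m) c
      = c + monthDays year month := by
  rcases (by omega : month ≤ 1 ∨ 1 < month) with h1 | h1
  · rw [PySem.List.pyRange_one_eq_nil h1]
    simp [monthDays, show ¬ (2 : Int) ≤ month by omega]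
  · interval_cases month <;>
    · simp only [monthDays]
      norm_num [PySem.List.pyRange_one_cons, PySem.List.pyRange_one_eq_nil, days_in_month,
        is_leap_eq, cumDays, PySem.List.pyGetD]
      by_cases hl : is_leap_alt year = true <;> simp [hl] <;> omega

-- ===== VERDICT (by name: the statement is the Claim_ definition above) =====
theorem to_seconds_spec : Claim_equal_to_seconds := by
  intro year month day hour minute second tz_offset _ hpre
  show _ = _
  simp only [to_seconds, to_seconds_alt, year_loop_eq', month_loop_eq year month hpre]
  simp only [yearDays, monthDays]
  split_ifs <;> ring
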